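-- pv_equiv track=rewrite | github.com/edt-yxz-zzd/python3_src | seed/seq_tools/lsls52ls.py | sizes_to_super_idx2ground_offset
-- ===== SOURCE A (Python) =====
-- def sizes_to_super_idx2ground_offset(sizes, /):
--     offsets = super_idx2ground_offset = []
--     offset = 0
--     for sz in sizes:
--         offsets.append(offset)
--         offset += sz
--     return super_idx2ground_offset
--     #offsets = [*accumulate([0, *sizes])]
--     offsets.pop()
--     return super_idx2ground_offset
-- ===== SOURCE B (Python) =====
-- def sizes_to_super_idx2ground_offset(sizes, /):
--     return [sum(sizes[:i]) for i in range(len(sizes))]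
-- ===== Notes on version B (the rewrite author's own statement) =====
-- stated objective: simpler
-- what changed: B computes each offset independently as the sum of the prefix slice sizes[:i] in a comprehension over indices (repeated partial scans), replacing A's single pass that appends a running accumulator.
import Mathlib
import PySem

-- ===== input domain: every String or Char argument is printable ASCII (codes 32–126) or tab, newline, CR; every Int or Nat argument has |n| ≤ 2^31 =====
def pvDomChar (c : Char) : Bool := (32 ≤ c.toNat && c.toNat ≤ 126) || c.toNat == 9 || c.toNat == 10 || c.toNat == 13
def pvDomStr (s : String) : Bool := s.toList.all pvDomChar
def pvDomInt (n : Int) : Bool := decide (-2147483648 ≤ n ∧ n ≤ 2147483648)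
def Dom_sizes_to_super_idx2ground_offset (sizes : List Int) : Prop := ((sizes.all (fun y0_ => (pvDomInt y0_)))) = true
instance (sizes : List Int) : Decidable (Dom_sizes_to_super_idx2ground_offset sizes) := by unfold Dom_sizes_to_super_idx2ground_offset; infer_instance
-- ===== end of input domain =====

-- B computes each offset independently as the sum of the prefix slice sizes[:i] over all indices, instead of A's single pass with a running accumulator; objective: simpler (not faster).


-- ===== PORT A =====
-- offsets list built by appending the running offset; offset accumulates sz
def sizes_to_super_idx2ground_offset (sizes : List Int) : List Int :=
  (sizes.foldl (fun (st : List Int × Int) sz => (st.1 ++ [st.2], st.2 + sz)) ([], 0)).1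

-- ===== PORT B =====
-- B: [sum(sizes[:i]) for i in range(len(sizes))]; sizes[:i] with 0 ≤ i ≤ len is List.take i
def sizes_to_super_idx2ground_offset_alt (sizes : List Int) : List Int :=
  (List.range sizes.length).map (fun i => (sizes.take i).sum)

-- ===== PRECONDITION & SPEC =====
def Spec_sizes_to_super_idx2ground_offset (sizes : List Int) (out : List Int) : Prop := out = sizes_to_super_idx2ground_offset_alt sizes
instance (sizes : List Int) (out : List Int) : Decidable (Spec_sizes_to_super_idx2ground_offset sizes out) := by unfold Spec_sizes_to_super_idx2ground_offset; infer_instance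

-- ===== CLAIM (what is proved, stated in full; the proofs are below) =====
def Claim_equal_sizes_to_super_idx2ground_offset : Prop := ∀ (sizes : List Int), Dom_sizes_to_super_idx2ground_offset sizes → Spec_sizes_to_super_idx2ground_offset sizes (sizes_to_super_idx2ground_offset sizes)

-- ===== LEMMAS AND PROOFS =====
theorem foldl_offsets (sizes : List Int) (acc : List Int) (off : Int) :
    (sizes.foldl (fun (st : List Int × Int) sz => (st.1 ++ [st.2], st.2 + sz)) (acc, off)).1
      = acc ++ (List.range sizes.length).map (fun i => off + (sizes.take i).sum) := by
  induction sizes generalizing acc off with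
  | nil => simp
  | cons x xs ih =>
      simp only [List.foldl_cons, ih, List.length_cons, List.range_succ_eq_map,
        List.map_cons, List.map_map]
      simp [Function.comp, List.append_assoc]
      intro a _
      ring

-- ===== VERDICT (by name: the statement is the Claim_ definition above) =====
theorem sizes_to_super_idx2ground_offset_spec : Claim_equal_sizes_to_super_idx2ground_offset := by
  intro sizes _
  unfold Spec_sizes_to_super_idx2ground_offset
  unfold sizes_to_super_idx2ground_offset sizes_to_super_idx2ground_offset_alt
  rw [foldl_offsets]
  simp
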